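-- pv_equiv track=rewrite | github.com/ziggiz-courier/ziggiz-courier-handler-core | core_data_processing/decoders/utils/leef_1_parser.py | _parse_extension
-- ===== SOURCE A (Python) =====
-- from typing import Dict, List, Optional
--
-- def _parse_extension(extension: str) -> Dict[str, str]:
--     """
--     Parse LEEF extension format (key=value pairs).
--
--     In LEEF 1.0, key-value pairs in the extension are typically tab-delimited
--     but can also be separated by spaces.
--
--     Args:
--         extension: The extension string
--
--     Returns:
--         Dictionary of parsed key-value pairs
--     """
--     result = {}
--
--     # Tab is the default delimiter in LEEF 1.0
--     delimiter = "\t"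
--     # If there are no tabs, try using spaces
--     if delimiter not in extension:
--         delimiter = " "
--
--     pairs = extension.split(delimiter)
--     for pair in pairs:
--         if not pair.strip():
--             continue
--
--         # Find the first equals sign
--         equals_pos = pair.find("=")
--         if equals_pos > 0:
--             key = pair[:equals_pos].strip()
--             value = pair[equals_pos + 1 :].strip()
--
--             # Handle escape sequences in values
--             value = _process_escapes(value)
--
--             result[key] = value
--
--     return result
--
-- def _process_escapes(value: str) -> str:
--     r"""
--     Process escape sequences in LEEF values.
--
--     LEEF escape sequences include:
--     - \= for equals sign
--     - \| for pipe
--     - \\ for backslash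
--     - \n for newline
--     - \r for carriage return
--     - \t for tab
--
--     Args:
--         value: The value string to process
--
--     Returns:
--         String with escape sequences resolved
--     """
--     i = 0
--     result = ""
--
--     while i < len(value):
--         if value[i] == "\\" and i + 1 < len(value):
--             # Handle escape sequences
--             if value[i + 1] == "\\":
--                 result += "\\"
--             elif value[i + 1] == "=":
--                 result += "="
--             elif value[i + 1] == "|":
--                 result += "|"
--             elif value[i + 1] == "n":
--                 result += "\n"
--             elif value[i + 1] == "r":
--                 result += "\r"
--             elif value[i + 1] == "t":
--                 result += "\t"
--             else:
--                 # Unknown escape sequence, keep as is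
--                 result += value[i + 1]
--             i += 2
--         else:
--             result += value[i]
--             i += 1
--
--     return result
-- ===== SOURCE B (Python) =====
-- # B: escapes resolved by splitting on backslash and gluing chunks back (staged
-- # passes) instead of an indexed lookahead scan; pairs parsed via partition in a
-- # dict comprehension. Alternative decomposition, same cost.
-- _ESC = {"\\": "\\", "=": "=", "|": "|", "n": "\n", "r": "\r", "t": "\t"}
--
--
-- def _process_escapes(value: str) -> str:
--     chunks = value.split("\\")
--     parts = [chunks[0]]
--     i = 1
--     n = len(chunks)
--     while i < n:
--         c = chunks[i]
--         if c:
--             parts.append(_ESC.get(c[0], c[0]))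
--             parts.append(c[1:])
--             i += 1
--         else:
--             # empty chunk = two consecutive backslashes (or one trailing one)
--             parts.append("\\")
--             if i + 1 < n:
--                 parts.append(chunks[i + 1])
--             i += 2
--     return "".join(parts)
--
--
-- def _parse_extension(extension: str):
--     delim = "\t" if "\t" in extension else " "
--     return {
--         k.strip(): _process_escapes(v.strip())
--         for k, sep, v in map(lambda p: p.partition("="), extension.split(delim))
--         if sep and k
--     }
-- ===== Notes on version B (the rewrite author's own statement) =====
-- stated objective: alternative
-- what changed: Escapes are resolved by splitting the value on backslash and gluing the chunks back (first char of each later chunk mapped through an escape table, empty chunks denoting doubled or trailing backslashes) instead of an indexed lookahead scan, and pairs are built by a dict comprehension over str.partition at the equals sign instead of a loop with find and slices.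
import Mathlib
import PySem

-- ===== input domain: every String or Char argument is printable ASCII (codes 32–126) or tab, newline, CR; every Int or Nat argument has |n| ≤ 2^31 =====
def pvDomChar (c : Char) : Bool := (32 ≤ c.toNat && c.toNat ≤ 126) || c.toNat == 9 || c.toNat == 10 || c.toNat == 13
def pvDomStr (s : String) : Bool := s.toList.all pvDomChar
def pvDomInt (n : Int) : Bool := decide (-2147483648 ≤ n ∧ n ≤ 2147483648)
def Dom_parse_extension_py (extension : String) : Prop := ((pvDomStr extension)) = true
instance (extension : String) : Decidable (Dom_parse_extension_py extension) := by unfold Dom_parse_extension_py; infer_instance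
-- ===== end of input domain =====

-- B resolves escapes by splitting the value on backslash and gluing the chunks back,
-- and builds the dict by a comprehension over partition('='); alternative decomposition.

-- ===== PORT A =====

-- the escape-character branch chain of A's _process_escapes, in A's branch order
def mapEscA (d : Char) : Char :=
  if d = '\\' then '\\'
  else if d = '=' then '='
  else if d = '|' then '|'
  else if d = 'n' then '\n'
  else if d = 'r' then '\r'
  else if d = 't' then '\t'
  else d

-- A's while loop: value[i] == '\\' and i+1 < len(value) consumes two chars, else one
def processEscapesA : List Char → List Char
  | [] => []
  | c :: d :: rest =>
    if c = '\\' then mapEscA d :: processEscapesA rest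
    else c :: processEscapesA (d :: rest)
  | [c] => [c]

-- one iteration of A's `for pair in pairs` loop body
def parseStepA (result : PySem.Dict String String) (pair : List Char) :
    PySem.Dict String String :=
  if PySem.Chars.strip pair = [] then result
  else
    let equalsPos := PySem.Chars.find pair ['=']
    if equalsPos > 0 then
      let key := PySem.Chars.strip (PySem.List.slice pair none (some equalsPos))
      let value := PySem.Chars.strip (PySem.List.slice pair (some (equalsPos + 1)) none)
      let value := processEscapesA value
      result.insert (String.ofList key) (String.ofList value)
    else result

def parse_extension_py (extension : String) : List (String × String) :=
  let delimiter : List Char := ['\t']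
  let delimiter := if !(PySem.Chars.isIn delimiter extension.toList) then [' '] else delimiter
  let pairs := PySem.Chars.splitOn extension.toList delimiter
  (pairs.foldl parseStepA PySem.Dict.empty).items

-- ===== PORT B =====

-- B's _ESC dict literal
def escTable : PySem.Dict Char Char :=
  PySem.Dict.ofList [('\\', '\\'), ('=', '='), ('|', '|'), ('n', '\n'), ('r', '\r'), ('t', '\t')]

-- B's while loop over chunks[1:]: a nonempty chunk contributes its mapped first char
-- plus its tail; an empty chunk is a doubled (or trailing) backslash and also
-- consumes the following chunk verbatim
def glueChunksB : List (List Char) → List Char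
  | [] => []
  | [] :: [] => ['\\']
  | [] :: c :: rest => '\\' :: (c ++ glueChunksB rest)
  | (x :: xs) :: rest => escTable.getD x x :: (xs ++ glueChunksB rest)

def processEscapesB (value : List Char) : List Char :=
  match PySem.Chars.splitOn value ['\\'] with
  | [] => []          -- unreachable: split never returns an empty list
  | c0 :: rest => c0 ++ glueChunksB rest

-- hand port of pair.partition("=") for the one-char separator "="; exact: Python's
-- partition returns (text before first '=', '=', text after) or (pair, '', '') if absent
def partitionB : List Char → List Char × Bool × List Char
  | [] => ([], false, [])
  | c :: rest =>
    if c = '=' then ([], true, rest)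
    else
      let r := partitionB rest
      (c :: r.1, r.2.1, r.2.2)

-- the comprehension's element: the (key, value) item of a pair, if `sep and k`
def pairItemB (pair : List Char) : Option (String × String) :=
  let r := partitionB pair
  if r.2.1 && !r.1.isEmpty then
    some (String.ofList (PySem.Chars.strip r.1),
          String.ofList (processEscapesB (PySem.Chars.strip r.2.2)))
  else none

def parse_extension_py_alt (extension : String) : List (String × String) :=
  let delim : List Char :=
    if PySem.Chars.isIn ['\t'] extension.toList then ['\t'] else [' ']
  -- the dict comprehension: insert every produced item in order
  (((PySem.Chars.splitOn extension.toList delim).filterMap pairItemB).foldl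
      (fun d kv => d.insert kv.1 kv.2) PySem.Dict.empty).items

-- ===== PRECONDITION & SPEC =====
def Spec_parse_extension_py (extension : String) (out : List (String × String)) : Prop := out = parse_extension_py_alt extension
instance (extension : String) (out : List (String × String)) : Decidable (Spec_parse_extension_py extension out) := by unfold Spec_parse_extension_py; infer_instance

-- ===== CLAIM (what is proved, stated in full; the proofs are below) =====
def Claim_equal_parse_extension_py : Prop := ∀ (extension : String), Dom_parse_extension_py extension → Spec_parse_extension_py extension (parse_extension_py extension)

-- ===== LEMMAS AND PROOFS =====

-- structural characterisation of splitOn on the one-char separator '\\'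
def splitRec : List Char → List (List Char)
  | [] => [[]]
  | c :: rest => if c = '\\' then [] :: splitRec rest else (splitRec rest).modifyHead (c :: ·)

theorem splitRec_ne_nil (l : List Char) : splitRec l ≠ [] := by
  cases l with
  | nil => simp [splitRec]
  | cons c rest =>
    simp only [splitRec]
    split
    · simp
    · cases h : splitRec rest with
      | nil => exact absurd h (splitRec_ne_nil rest)
      | cons a t => simp

theorem splitOn_go_eq (fuel : Nat) : ∀ (l cur : List Char) (acc : List (List Char)),
    l.length < fuel →
    PySem.Chars.splitOn.go ['\\'] fuel l cur acc
      = acc.reverse ++ (splitRec l).modifyHead (cur.reverse ++ ·) := by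
  induction fuel with
  | zero => intro l cur acc h; omega
  | succ n ih =>
    intro l cur acc h
    cases l with
    | nil => simp [PySem.Chars.splitOn.go, splitRec]
    | cons c rest =>
      by_cases hc : c = '\\'
      · subst hc
        rw [show PySem.Chars.splitOn.go ['\\'] (n+1) ('\\' :: rest) cur acc
            = PySem.Chars.splitOn.go ['\\'] n (List.drop 1 ('\\' :: rest)) [] (cur.reverse :: acc) by
          simp [PySem.Chars.splitOn.go, List.isPrefixOf]]
        rw [List.drop_one, List.tail_cons, ih rest [] (cur.reverse :: acc) (by simp at h ⊢; omega)]
        cases hs : splitRec rest with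
        | nil => exact absurd hs (splitRec_ne_nil rest)
        | cons a t => simp [splitRec, hs]
      · rw [show PySem.Chars.splitOn.go ['\\'] (n+1) (c :: rest) cur acc
            = PySem.Chars.splitOn.go ['\\'] n rest (c :: cur) acc by
          simp only [PySem.Chars.splitOn.go, List.isPrefixOf]
          simp [Ne.symm hc]]
        rw [ih rest (c :: cur) acc (by simp at h ⊢; omega)]
        cases hs : splitRec rest with
        | nil => exact absurd hs (splitRec_ne_nil rest)
        | cons a t => simp [splitRec, hs, hc]

theorem splitOn_eq_splitRec (v : List Char) :
    PySem.Chars.splitOn v ['\\'] = splitRec v := by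
  rw [PySem.Chars.splitOn, splitOn_go_eq (v.length + 1) v [] [] (by omega)]
  cases hs : splitRec v with
  | nil => exact absurd hs (splitRec_ne_nil v)
  | cons a t => simp

theorem escTable_getD (c : Char) : escTable.getD c c = mapEscA c := by
  have h : escTable = PySem.Dict.mk
      [('\\', '\\'), ('=', '='), ('|', '|'), ('n', '\n'), ('r', '\r'), ('t', '\t')] := by
    decide
  rw [h]
  simp only [PySem.Dict.getD, PySem.Dict.get?_mk_cons, mapEscA]
  split_ifs <;> simp_all [PySem.Dict.get?] <;> simp_all [eq_comm]

theorem processEscapesA_cons_other {c : Char} (hc : c ≠ '\\') (rest : List Char) :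
    processEscapesA (c :: rest) = c :: processEscapesA rest := by
  cases rest with
  | nil => rfl
  | cons d r => simp [processEscapesA, hc]

-- proof-only view of B's match on the chunk list
def glueAll : List (List Char) → List Char
  | [] => []
  | c0 :: rest => c0 ++ glueChunksB rest

theorem processEscapesB_eq_glueAll (v : List Char) :
    processEscapesB v = glueAll (PySem.Chars.splitOn v ['\\']) := by
  cases h : PySem.Chars.splitOn v ['\\'] <;> simp [processEscapesB, glueAll, h]

-- the glued chunks of v compute A's scan of v
theorem glue_splitRec (n : Nat) : ∀ v : List Char, v.length ≤ n →
    glueAll (splitRec v) = processEscapesA v := by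
  induction n with
  | zero => intro v h; rw [List.length_eq_zero_iff.mp (Nat.le_zero.mp h)]; rfl
  | succ n ih =>
    intro v h
    match v with
    | [] => rfl
    | c :: w =>
      by_cases hc : c = '\\'
      · subst hc
        match w with
        | [] => simp [splitRec, glueAll, glueChunksB, processEscapesA]
        | d :: u =>
          by_cases hd : d = '\\'
          · subst hd
            have := ih u (by simp at h ⊢; omega)
            cases hs : splitRec u with
            | nil => exact absurd hs (splitRec_ne_nil u)
            | cons a t =>
              rw [hs] at this
              simp only [glueAll] at this
              simp [splitRec, hs, glueAll, glueChunksB, processEscapesA, mapEscA, this]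
          · have := ih u (by simp at h ⊢; omega)
            cases hs : splitRec u with
            | nil => exact absurd hs (splitRec_ne_nil u)
            | cons a t =>
              rw [hs] at this
              simp only [glueAll] at this
              simp [splitRec, hs, hd, glueAll, glueChunksB, processEscapesA, escTable_getD,
                this]
      · have := ih w (by simp at h ⊢; omega)
        cases hs : splitRec w with
        | nil => exact absurd hs (splitRec_ne_nil w)
        | cons a t =>
          rw [hs] at this
          simp only [glueAll] at this
          simp [splitRec, hs, hc, glueAll, processEscapesA_cons_other hc, this]

theorem processEscapes_eq (v : List Char) : processEscapesB v = processEscapesA v := by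
  rw [processEscapesB_eq_glueAll, splitOn_eq_splitRec]
  exact glue_splitRec v.length v le_rfl

-- partitionB spec: either no '=' and the triple is (pair, false, []), or
-- pair decomposes around its first '='
theorem partitionB_spec (pair : List Char) :
    (partitionB pair = (pair, false, []) ∧ '=' ∉ pair)
    ∨ ((partitionB pair).2.1 = true ∧ pair = (partitionB pair).1 ++ '=' :: (partitionB pair).2.2
        ∧ '=' ∉ (partitionB pair).1) := by
  induction pair with
  | nil => left; exact ⟨rfl, by simp⟩
  | cons c rest ih =>
    by_cases hc : c = '='
    · subst hc; right; simp [partitionB]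
    · rcases ih with ⟨heq, hmem⟩ | ⟨hf, hsplit, hmem⟩
      · left
        constructor
        · simp [partitionB, hc, heq]
        · simp [hmem, Ne.symm hc]
      · right
        refine ⟨by simp [partitionB, hc, hf], ?_, ?_⟩
        · simp only [partitionB, if_neg hc]
          exact congrArg (c :: ·) hsplit
        · simp only [partitionB, if_neg hc, List.mem_cons, not_or]
          exact ⟨Ne.symm hc, hmem⟩

theorem find_eq_of_split (h t : List Char) (hn : '=' ∉ h) :
    PySem.Chars.find (h ++ '=' :: t) ['='] = (h.length : Int) := by
  set s := h ++ '=' :: t with hs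
  have hin : ['='] <:+: s := by
    rw [List.singleton_infix_iff]
    exact List.mem_append_right _ (List.mem_cons_self ..)
  have hnn : 0 ≤ PySem.Chars.find s ['='] := (PySem.Chars.find_nonneg_iff s ['=']).mpr hin
  obtain ⟨hpre, hmin⟩ := PySem.Chars.find_spec hnn
  set n := (PySem.Chars.find s ['=']).toNat with hn'
  have hdropH : s.drop h.length = '=' :: t := by
    rw [hs, List.drop_left]
  have hne : n = h.length := by
    rcases Nat.lt_trichotomy n h.length with hlt | heq | hgt
    · exfalso
      obtain ⟨u, hu⟩ := hpre
      have hget : s[n]? = some '=' := by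
        have : (s.drop n).head? = some '=' := by rw [← hu]; rfl
        rwa [List.head?_drop] at this
      rw [hs, List.getElem?_append_left hlt] at hget
      exact hn (List.mem_of_getElem? hget)
    · exact heq
    · exact absurd (hdropH ▸ ⟨t, rfl⟩) (hmin h.length hgt)
  omega

theorem isspace_eq_false : PySem.Chars.isspace '=' = false := by decide

theorem mem_dropWhile_eq {m : List Char} (hm : '=' ∈ m) :
    '=' ∈ List.dropWhile PySem.Chars.isspace m := by
  have hsplit := (List.takeWhile_append_dropWhile (p := PySem.Chars.isspace) (l := m))
  rw [← hsplit] at hm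
  rcases List.mem_append.mp hm with hh | hh
  · exact absurd (List.mem_takeWhile_imp hh) (by simp [isspace_eq_false])
  · exact hh

theorem mem_strip_of_mem {l : List Char} (h : '=' ∈ l) : '=' ∈ PySem.Chars.strip l := by
  simp only [PySem.Chars.strip, PySem.Chars.rstrip, PySem.Chars.lstrip]
  exact List.mem_reverse.mpr (mem_dropWhile_eq (List.mem_reverse.mpr (mem_dropWhile_eq h)))

theorem strip_ne_nil {l : List Char} (h : '=' ∈ l) : PySem.Chars.strip l ≠ [] := by
  intro hnil
  exact absurd (mem_strip_of_mem h) (by simp [hnil])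

-- A's loop step, phrased through B's item extractor
theorem step_eq (d : PySem.Dict String String) (pair : List Char) :
    parseStepA d pair = match pairItemB pair with
      | some kv => d.insert kv.1 kv.2
      | none => d := by
  rcases hpb : partitionB pair with ⟨h, f, t⟩
  rcases partitionB_spec pair with ⟨heq, hmem⟩ | ⟨hf, hsplit, hmem⟩
  · -- no '=' in pair: both sides return d
    have hfind : PySem.Chars.find pair ['='] = -1 := by
      rw [PySem.Chars.find_eq_neg_one_iff, List.singleton_infix_iff]
      exact hmem
    simp only [parseStepA, pairItemB, heq, hfind]
    split <;> simp
  · rw [hpb] at hf hsplit hmem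
    simp only at hf hsplit hmem
    subst hf
    have hfind : PySem.Chars.find pair ['='] = (h.length : Int) := by
      rw [hsplit]
      exact find_eq_of_split h t hmem
    have hmempair : '=' ∈ pair := by
      rw [hsplit]; exact List.mem_append_right _ (List.mem_cons_self ..)
    have hstrip : ¬ PySem.Chars.strip pair = [] := strip_ne_nil hmempair
    simp only [parseStepA, pairItemB, hpb, hfind, if_neg hstrip]
    by_cases hh : h = []
    · simp [hh]
    · have hpos : ((h.length : Int) > 0) := by
        have : 0 < h.length := List.length_pos_iff.mpr hh
        exact_mod_cast this
      rw [if_pos hpos]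
      have hkey : PySem.List.slice pair none (some (h.length : Int)) = h := by
        rw [PySem.List.slice_to pair (b := (h.length : Int)) (by positivity),
          Int.toNat_natCast, hsplit, List.take_left]
      have hval : PySem.List.slice pair (some ((h.length : Int) + 1)) none = t := by
        rw [PySem.List.slice_from pair (a := (h.length : Int) + 1) (by positivity)]
        have h1 : ((h.length : Int) + 1).toNat = (h ++ ['=']).length := by simp
        have h2 : h ++ '=' :: t = (h ++ ['=']) ++ t := by simp
        rw [h1, hsplit, h2, List.drop_left]
      rw [hkey, hval, processEscapes_eq]
      simp [hh]

-- folding A's step over a pair list = folding insert over the filterMapped items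
theorem foldl_eq (pairs : List (List Char)) : ∀ d : PySem.Dict String String,
    pairs.foldl parseStepA d
      = (pairs.filterMap pairItemB).foldl (fun d kv => d.insert kv.1 kv.2) d := by
  induction pairs with
  | nil => intro d; rfl
  | cons p rest ih =>
    intro d
    rw [List.foldl_cons, List.filterMap_cons, step_eq]
    cases hp : pairItemB p with
    | none => exact ih d
    | some kv => simp only [List.foldl_cons]; exact ih _

-- ===== VERDICT (by name: the statement is the Claim_ definition above) =====
theorem parse_extension_py_spec : Claim_equal_parse_extension_py := by
  intro ext _
  show parse_extension_py ext = parse_extension_py_alt ext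
  unfold parse_extension_py parse_extension_py_alt
  by_cases hd : PySem.Chars.isIn ['\t'] ext.toList <;>
    simp [hd, foldl_eq]
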